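-- pv_equiv track=rewrite | github.com/liyown/mycode | python/cdc_in_dnn_code_mnist/new_function.py | Generate_ShiftList_new
-- ===== SOURCE A (Python) =====
-- def shift_matrix(lst, a):
--     '''
--     A:待移位矩阵
--     a：移位的位数
--     return:已移位的矩阵
--     '''
--
--     return lst[-a:] + lst[ :-a]
--
-- def Generate_ShiftList_new(k, num):
--
--     '''
--     k:数据包恢复的个数
--     n：多少组移位矩阵
--     return:[[0 1 3],[3 0 1],[1 3 0]] 或[[0 2 6 12],[12 0 2 6],[6 12 0 2],[2 6 12 0]]
--     '''
--
--     k = int(k** 0.5)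
--
--     ShiftList = list()
--     for i in range(num):
--         ShiftList.append(list([0]))
--
--
--     for i in range(k-1):
--         for j in range(num):
--             ShiftList[j].append((j+1 + i*(num) + ShiftList[j][i]))
--
--
--     ShiftList_n = list()
--     for i in range(num):
--         for j in range(k):
--             ShiftList_n.append(shift_matrix(ShiftList[i], j))
--
--     return ShiftList_n
-- ===== SOURCE B (Python) =====
-- def Generate_ShiftList_new(k, num):
--     k = int(k ** 0.5)
--     res = []
--     for i in range(num):
--         base = [m * (i + 1) + num * (m * (m - 1) // 2) for m in range(k)]
--         for s in range(k):
--             res.append(base[k - s:] + base[:k - s])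
--     return res
-- ===== Notes on version B (the rewrite author's own statement) =====
-- stated objective: simpler
-- what changed: B computes each base row directly by the closed form m*(i+1) + num*(m*(m-1)//2) and emits every cyclic shift by plain nonnegative slicing, replacing A's stepwise cumulative recurrence that grows a shared list-of-lists row by row and its negative-index shift_matrix helper.
import Mathlib
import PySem

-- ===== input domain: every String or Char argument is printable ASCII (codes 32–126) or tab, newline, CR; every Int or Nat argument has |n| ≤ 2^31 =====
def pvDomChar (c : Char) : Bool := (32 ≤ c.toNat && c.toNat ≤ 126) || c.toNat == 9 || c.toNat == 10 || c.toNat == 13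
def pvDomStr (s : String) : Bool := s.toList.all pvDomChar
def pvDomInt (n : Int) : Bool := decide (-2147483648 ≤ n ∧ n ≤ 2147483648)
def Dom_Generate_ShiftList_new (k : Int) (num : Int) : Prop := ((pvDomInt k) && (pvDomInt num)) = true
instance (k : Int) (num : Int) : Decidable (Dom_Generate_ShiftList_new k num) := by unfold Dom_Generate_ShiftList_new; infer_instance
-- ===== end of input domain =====

-- B computes the rows by a closed form and shifts by nonnegative slices instead of A's
-- cumulative recurrence over a shared list-of-lists (objective: simpler; same cost).


-- ===== PORT A =====
-- lst[-a:] + lst[:-a]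
def shift_matrix (lst : List Int) (a : Int) : List Int :=
  PySem.List.slice lst (some (-a)) none ++ PySem.List.slice lst none (some (-a))

-- first loop: ShiftList.append([0]) for i in range(num)
def pvAInit (num : Int) : List (List Int) :=
  (PySem.List.pyRange 0 num 1).foldl (fun acc _ => acc ++ [[(0 : Int)]]) []

-- inner 'for j in range(num): ShiftList[j].append(...)': each iteration appends to row j
-- only and ShiftList has exactly num rows, so one pass over the rows with their index;
-- pyGetD's default never fires (index i is in range on every reached state).
def pvAStep (num : Int) (sl : List (List Int)) (i : Int) : List (List Int) :=
  sl.mapIdx (fun j row => row ++ [((j : Int) + 1 + i * num + PySem.List.pyGetD row i 0)])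

def pvAFilled (k' num : Int) : List (List Int) :=
  (PySem.List.pyRange 0 (k' - 1) 1).foldl (pvAStep num) (pvAInit num)

def Generate_ShiftList_new (k : Int) (num : Int) : List (List Int) :=
  -- k = int(k ** 0.5): exact as Nat.sqrt on the admitted inputs (0 ≤ k ≤ 2^31, per Pre_ and Dom)
  let k' : Int := (Nat.sqrt k.toNat : Int)
  let filled := pvAFilled k' num
  (PySem.List.pyRange 0 num 1).foldl (fun acc i =>
    (PySem.List.pyRange 0 k' 1).foldl (fun acc2 j =>
      acc2 ++ [shift_matrix (PySem.List.pyGetD filled i []) j]) acc) []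

-- ===== PORT B =====
def Generate_ShiftList_new_alt (k : Int) (num : Int) : List (List Int) :=
  let kk : Nat := Nat.sqrt k.toNat   -- k = int(k ** 0.5), exact on the admitted inputs
  (List.range num.toNat).foldl (fun (res : List (List Int)) (i : Nat) =>
    let base : List Int := (List.range kk).map (fun (m : Nat) =>
      (m : Int) * ((i : Int) + 1) + num * PySem.Int.floordiv ((m : Int) * ((m : Int) - 1)) 2)
    -- base[kk-s:] + base[:kk-s] with 0 ≤ kk-s ≤ len(base): plain drop/take
    res ++ (List.range kk).map (fun (s : Nat) => base.drop (kk - s) ++ base.take (kk - s))) []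

-- ===== PRECONDITION & SPEC =====
-- Pre_ excludes exactly k < 0, where A raises TypeError ((**0.5) of a negative int is complex).
def Pre_Generate_ShiftList_new (k : Int) (num : Int) : Prop := 0 ≤ k
instance (k : Int) (num : Int) : Decidable (Pre_Generate_ShiftList_new k num) := by
  unfold Pre_Generate_ShiftList_new; infer_instance

def pvWitness_Generate_ShiftList_new : Int × Int := (9, 3)

def Spec_Generate_ShiftList_new (k : Int) (num : Int) (out : List (List Int)) : Prop := out = Generate_ShiftList_new_alt k num
instance (k : Int) (num : Int) (out : List (List Int)) : Decidable (Spec_Generate_ShiftList_new k num out) := by unfold Spec_Generate_ShiftList_new; infer_instance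

-- ===== CLAIM (what is proved, stated in full; the proofs are below) =====
def Claim_equal_Generate_ShiftList_new : Prop := ∀ (k : Int) (num : Int), Dom_Generate_ShiftList_new k num → Pre_Generate_ShiftList_new k num → Spec_Generate_ShiftList_new k num (Generate_ShiftList_new k num)

-- ===== LEMMAS AND PROOFS =====

-- The value A's recurrence stores at position m of row j.
def rowFun (num j : Int) : Nat → Int
  | 0 => 0
  | m + 1 => j + 1 + (m : Int) * num + rowFun num j m

theorem rowFun_closed (num j : Int) (m : Nat) :
    rowFun num j m = (m : Int) * (j + 1) + num * PySem.Int.floordiv ((m : Int) * ((m : Int) - 1)) 2 := by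
  induction m with
  | zero => simp [rowFun, PySem.Int.floordiv]
  | succ m ih =>
      have h2 : PySem.Int.floordiv (((m : Int) + 1) * (m : Int)) 2
          = PySem.Int.floordiv ((m : Int) * ((m : Int) - 1)) 2 + (m : Int) := by
        simp only [PySem.Int.floordiv_eq_ediv_of_pos (show (0:Int) < 2 by norm_num)]
        rw [show ((m : Int) + 1) * (m : Int) = (m : Int) * ((m : Int) - 1) + (m : Int) * 2 by ring,
          Int.add_mul_ediv_right _ _ (by omega)]
      rw [rowFun, ih]
      push_cast
      rw [show ((m : Int) + 1 - 1) = (m : Int) by ring, h2]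
      ring

theorem pvAInit_eq (num : Int) :
    pvAInit num = (List.range num.toNat).map (fun _ => [(0 : Int)]) := by
  unfold pvAInit
  rw [PySem.List.foldl_append_singleton_eq_map, PySem.List.pyRange_one]
  simp [List.map_map, Function.comp_def]

theorem mapIdx_map_range {α : Type} (g : Nat → α → α) (f : Nat → α) (N : Nat) :
    ((List.range N).map f).mapIdx g = (List.range N).map (fun (j : Nat) => g j (f j)) := by
  apply List.ext_getElem
  · simp
  · intro idx h1 h2
    simp [List.getElem_mapIdx]

theorem pvAStep_eq (num : Int) (N n : Nat) :
    pvAStep num ((List.range N).map (fun (j : Nat) => (List.range (n + 1)).map (rowFun num (j : Int)))) (n : Int)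
      = (List.range N).map (fun (j : Nat) => (List.range (n + 2)).map (rowFun num (j : Int))) := by
  unfold pvAStep
  rw [mapIdx_map_range]
  apply List.map_congr_left
  intro j _
  rw [PySem.List.pyGetD_natCast, PySem.List.getD_map_range _ _ _ _ (by omega)]
  conv_rhs => rw [show n + 2 = (n + 1) + 1 from rfl, List.range_succ]
  simp [rowFun]

theorem pvAFilled_eq (num : Int) (n : Nat) :
    (PySem.List.pyRange 0 (n : Int) 1).foldl (pvAStep num) (pvAInit num)
      = (List.range num.toNat).map (fun (j : Nat) => (List.range (n + 1)).map (rowFun num (j : Int))) := by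
  induction n with
  | zero =>
      rw [PySem.List.pyRange_one_eq_nil (by omega)]
      rw [List.foldl_nil, pvAInit_eq]
      simp [List.range_succ, rowFun]
  | succ n ih =>
      rw [show ((n + 1 : Nat) : Int) = (n : Int) + 1 by push_cast; ring,
        PySem.List.pyRange_one_succ_right (by omega), List.foldl_append, ih, List.foldl_cons,
        List.foldl_nil, pvAStep_eq]

theorem shift_matrix_eq (lst : List Int) (kk s : Nat) (hl : lst.length = kk) (hs : s < kk) :
    shift_matrix lst (s : Int) = lst.drop (kk - s) ++ lst.take (kk - s) := by
  unfold shift_matrix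
  rcases Nat.eq_zero_or_pos s with h0 | hpos
  · subst h0
    simp only [Nat.cast_zero, neg_zero]
    rw [show ((0 : Int)) = ((0 : Nat) : Int) from rfl, PySem.List.slice_from_natCast lst 0,
      PySem.List.slice_to_natCast lst 0]
    simp [List.drop_of_length_le (le_of_eq hl), List.take_of_length_le (le_of_eq hl)]
  · rw [PySem.List.slice_from_neg_natCast lst s hpos, PySem.List.slice_to_neg_natCast lst s hpos, hl]

theorem pv_main (k num : Int) :
    Generate_ShiftList_new k num = Generate_ShiftList_new_alt k num := by
  unfold Generate_ShiftList_new Generate_ShiftList_new_alt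
  set kk : Nat := Nat.sqrt k.toNat with hkk
  simp only [PySem.List.foldl_append_singleton_eq_map, PySem.List.foldl_append_eq_flatMap,
    List.nil_append]
  rw [PySem.List.pyRange_one 0 num, List.flatMap_map]
  simp only [zero_add, Int.sub_zero]
  apply List.flatMap_congr
  intro i hi
  rw [List.mem_range] at hi
  rcases Nat.eq_zero_or_pos kk with hk0 | hkpos
  · rw [hk0]
    simp [PySem.List.pyRange_one_eq_nil]
  · obtain ⟨t, ht⟩ : ∃ t, kk = t + 1 := ⟨kk - 1, by omega⟩
    have hfill : pvAFilled (kk : Int) num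
        = (List.range num.toNat).map (fun (j : Nat) => (List.range kk).map (rowFun num (j : Int))) := by
      unfold pvAFilled
      rw [show ((kk : Int) - 1) = ((t : Nat) : Int) by omega, pvAFilled_eq, ← ht]
    rw [hfill, PySem.List.pyGetD_natCast, PySem.List.getD_map_range _ _ _ _ hi]
    rw [PySem.List.pyRange_one 0 (kk : Int)]
    rw [List.map_map]
    simp only [Function.comp_def, zero_add, Int.sub_zero, Int.toNat_natCast]
    apply List.map_congr_left
    intro s hs
    rw [List.mem_range] at hs
    rw [shift_matrix_eq _ kk s (by simp) hs]
    have hrow : (List.range kk).map (rowFun num (i : Int))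
        = (List.range kk).map (fun (m : Nat) =>
            (m : Int) * ((i : Int) + 1) + num * PySem.Int.floordiv ((m : Int) * ((m : Int) - 1)) 2) := by
      apply List.map_congr_left
      intro m _
      exact rowFun_closed num (i : Int) m
    rw [hrow]

-- ===== VERDICT (by name: the statement is the Claim_ definition above) =====
theorem Generate_ShiftList_new_spec : Claim_equal_Generate_ShiftList_new := by
  intro k num _hDom _hPre
  unfold Spec_Generate_ShiftList_new
  exact pv_main k num
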